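-- pv_equiv track=rewrite | github.com/notsage817/semantix | src/semantix/processor/job_html_extractor.py | _extract_education_requirements
-- ===== SOURCE A (Python) =====
-- from typing import Dict, List, Optional, Any
--
-- def _extract_education_requirements(qualifications: List[str]) -> List[str]:
--     """Extract education-specific requirements from qualifications list."""
--     education_requirements = []
--
--     # Education-related keywords to look for
--     education_keywords = [
--         "degree",
--         "bachelor",
--         "master",
--         "phd",
--         "bs",
--         "ba",
--         "ms",
--         "ma",
--         "mba",
--         "education",
--         "university",
--         "college",
--         "graduate",
--         "undergraduate",
--         "computer science",
--         "engineering",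
--         "equivalent education",
--     ]
--
--     for qual in qualifications:
--         qual_lower = qual.lower()
--         # Check if any education keyword appears in the qualification
--         if any(keyword in qual_lower for keyword in education_keywords):
--             education_requirements.append(qual)
--
--     return education_requirements
-- ===== SOURCE B (Python) =====
-- from typing import List
--
--
-- def _extract_education_requirements(qualifications: List[str]) -> List[str]:
--     """Extract education-specific requirements from qualifications list.
--
--     Builds a character trie of the education keywords once, then for each
--     lowercased qualification scans its positions descending the trie, so the
--     per-keyword inner loop disappears (shared prefixes are tested once).
--     """
--     keywords = [
--         "degree",
--         "bachelor",
--         "master",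
--         "phd",
--         "bs",
--         "ba",
--         "ms",
--         "ma",
--         "mba",
--         "education",
--         "university",
--         "college",
--         "graduate",
--         "undergraduate",
--         "computer science",
--         "engineering",
--         "equivalent education",
--     ]
--
--     root = {}
--     for kw in keywords:
--         node = root
--         for ch in kw:
--             node = node.setdefault(ch, {})
--         node[None] = True  # end-of-keyword marker
--
--     def matches(text: str) -> bool:
--         n = len(text)
--         for i in range(n):
--             node = root
--             j = i
--             while True:
--                 if None in node:
--                     return True
--                 if j >= n or text[j] not in node:
--                     break
--                 node = node[text[j]]
--                 j += 1
--         return False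
--
--     return [q for q in qualifications if matches(q.lower())]
-- ===== Notes on version B (the rewrite author's own statement) =====
-- stated objective: alternative
-- what changed: B builds a character trie of the keywords once and decides each qualification by scanning its positions with a single trie descent, replacing A's per-keyword 'keyword in text' inner loop with a shared-prefix automaton walk.
import Mathlib
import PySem

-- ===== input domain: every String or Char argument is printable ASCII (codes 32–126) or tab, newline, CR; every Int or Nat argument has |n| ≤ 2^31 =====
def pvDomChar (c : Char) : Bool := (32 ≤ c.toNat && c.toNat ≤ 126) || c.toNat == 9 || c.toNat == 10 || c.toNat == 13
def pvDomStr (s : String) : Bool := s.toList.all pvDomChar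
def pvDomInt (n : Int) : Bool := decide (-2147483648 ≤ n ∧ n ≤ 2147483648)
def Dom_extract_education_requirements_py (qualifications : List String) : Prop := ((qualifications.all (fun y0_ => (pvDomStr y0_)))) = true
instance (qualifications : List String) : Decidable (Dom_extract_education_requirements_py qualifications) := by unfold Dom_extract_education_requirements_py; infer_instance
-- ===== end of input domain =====

-- B builds a character trie of the keywords once and decides each qualification by a
-- per-position trie descent instead of A's per-keyword substring loop (objective: alternative).

-- ===== PORT A =====
def eduKeywords : List String :=
  ["degree", "bachelor", "master", "phd", "bs", "ba", "ms", "ma", "mba",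
   "education", "university", "college", "graduate", "undergraduate",
   "computer science", "engineering", "equivalent education"]

def extract_education_requirements_py (qualifications : List String) : List String :=
  qualifications.foldl
    (fun acc qual =>
      let qual_lower := PySem.Str.lower qual
      if eduKeywords.any (fun keyword => PySem.Str.isIn keyword qual_lower) then
        acc ++ [qual]
      else acc)
    []

-- ===== PORT B =====
-- A trie node: end-of-keyword flag (Python's `None` marker) and an in-insertion-order
-- child list (the Python dict); a mutual pair instead of a nested inductive.
mutual
inductive Trie where
  | node : Bool → Kids → Trie
inductive Kids where
  | nil : Kids
  | cons : Char → Trie → Kids → Kids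
end

-- Dict lookup: first (= unique) child with this char.
def Kids.find? (k : Kids) (c : Char) : Option Trie :=
  match k with
  | .nil => none
  | .cons c' t rest => if c' = c then some t else Kids.find? rest c

-- Dict write: overwrite in place, or append a new key at the end (Python dict order).
def Kids.set (k : Kids) (c : Char) (t : Trie) : Kids :=
  match k with
  | .nil => .cons c t .nil
  | .cons c' t' rest => if c' = c then .cons c' t rest else .cons c' t' (Kids.set rest c t)

-- Python's setdefault walk that inserts one keyword, then sets the end marker.
def Trie.insert (t : Trie) (w : List Char) : Trie :=
  match t, w with
  | .node _ k, [] => .node true k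
  | .node b k, c :: cs =>
      .node b (Kids.set k c (Trie.insert ((Kids.find? k c).getD (.node false .nil)) cs))
termination_by structural w

def eduTrie : Trie :=
  eduKeywords.foldl (fun t kw => Trie.insert t kw.toList) (.node false .nil)

-- Python's inner `while True` descent from one start position (suffix = remaining chars).
def Trie.descend (t : Trie) (l : List Char) : Bool :=
  match t, l with
  | .node b _, [] => b
  | .node b k, c :: r =>
      b || (match Kids.find? k c with
            | none => false
            | some t' => Trie.descend t' r)
termination_by structural l

-- Python's `for i in range(n)` over start positions.
def trieScan : List Char → Bool
  | [] => false
  | c :: r => Trie.descend eduTrie (c :: r) || trieScan r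

def extract_education_requirements_py_alt (qualifications : List String) : List String :=
  qualifications.filter (fun q => trieScan (PySem.Str.lower q).toList)

-- ===== PRECONDITION & SPEC =====
def Spec_extract_education_requirements_py (qualifications : List String) (out : List String) : Prop := out = extract_education_requirements_py_alt qualifications
instance (qualifications : List String) (out : List String) : Decidable (Spec_extract_education_requirements_py qualifications out) := by unfold Spec_extract_education_requirements_py; infer_instance

-- ===== CLAIM (what is proved, stated in full; the proofs are below) =====
def Claim_equal_extract_education_requirements_py : Prop := ∀ (qualifications : List String), Dom_extract_education_requirements_py qualifications → Spec_extract_education_requirements_py qualifications (extract_education_requirements_py qualifications)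

-- ===== LEMMAS AND PROOFS =====

theorem find?_set_self : ∀ (k : Kids) (c : Char) (t' : Trie),
    Kids.find? (Kids.set k c t') c = some t'
  | .nil, c, t' => by simp [Kids.set, Kids.find?]
  | .cons c' t rest, c, t' => by
      by_cases h : c' = c <;>
        simp [Kids.set, Kids.find?, h, find?_set_self rest c t']

theorem find?_set_ne : ∀ (k : Kids) (c : Char) (t' : Trie) (d : Char), d ≠ c →
    Kids.find? (Kids.set k c t') d = Kids.find? k d
  | .nil, c, t', d, h => by simp [Kids.set, Kids.find?, Ne.symm h]
  | .cons c' t rest, c, t', d, h => by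
      by_cases hc : c' = c
      · subst hc
        simp [Kids.set, Kids.find?, Ne.symm h]
      · simp [Kids.set, Kids.find?, hc, find?_set_ne rest c t' d h]

theorem descend_empty (l : List Char) :
    Trie.descend (.node false .nil) l = false := by
  cases l <;> simp [Trie.descend, Kids.find?]

-- Inserting a keyword adds exactly the 'is a prefix' test for that keyword.
theorem descend_insert : ∀ (w : List Char) (t : Trie) (l : List Char),
    Trie.descend (Trie.insert t w) l = true ↔ w <+: l ∨ Trie.descend t l = true := by
  intro w
  induction w with
  | nil =>
    intro t l
    cases t with
    | node b k =>
      cases l <;> simp [Trie.insert, Trie.descend]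
  | cons c cs ih =>
    intro t l
    cases t with
    | node b k =>
      cases l with
      | nil => simp [Trie.insert, Trie.descend]
      | cons d r =>
        by_cases hd : d = c
        · subst hd
          simp only [Trie.insert, Trie.descend, find?_set_self, Bool.or_eq_true,
            List.cons_prefix_cons, true_and, ih]
          cases hfc : Kids.find? k d with
          | none => simp [descend_empty]; tauto
          | some t0 => simp; tauto
        · simp only [Trie.insert, Trie.descend, find?_set_ne k c _ d hd,
            Bool.or_eq_true, List.cons_prefix_cons]
          constructor
          · intro h; exact Or.inr h
          · rintro (⟨hdc, _⟩ | h)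
            · exact absurd hdc.symm hd
            · exact h

-- Folding the whole keyword list in: the trie tests 'some keyword is a prefix'.
theorem descend_foldl : ∀ (ws : List String) (t : Trie) (l : List Char),
    Trie.descend (ws.foldl (fun t kw => Trie.insert t kw.toList) t) l = true
      ↔ (∃ kw ∈ ws, kw.toList <+: l) ∨ Trie.descend t l = true := by
  intro ws
  induction ws with
  | nil => intro t l; simp
  | cons kw rest ih =>
    intro t l
    simp only [List.foldl_cons, ih, descend_insert, List.mem_cons]
    constructor
    · rintro (⟨kw', h1, h2⟩ | h | h)
      · exact Or.inl ⟨kw', Or.inr h1, h2⟩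
      · exact Or.inl ⟨kw, Or.inl rfl, h⟩
      · exact Or.inr h
    · rintro (⟨kw', rfl | h1, h2⟩ | h)
      · exact Or.inr (Or.inl h2)
      · exact Or.inl ⟨kw', h1, h2⟩
      · exact Or.inr (Or.inr h)

theorem eduTrie_descend_iff (l : List Char) :
    Trie.descend eduTrie l = true ↔ ∃ kw ∈ eduKeywords, kw.toList <+: l := by
  unfold eduTrie
  rw [descend_foldl]
  simp [descend_empty]

theorem trieScan_iff (l : List Char) :
    trieScan l = true ↔ ∃ kw ∈ eduKeywords, kw.toList <:+: l := by
  induction l with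
  | nil =>
    simp only [trieScan]
    constructor
    · intro h; exact absurd h (by decide)
    · rintro ⟨kw, hkw, hinf⟩
      have : kw.toList = [] := List.eq_nil_of_infix_nil hinf
      fin_cases hkw <;> simp_all
  | cons c r ih =>
    simp only [trieScan, Bool.or_eq_true, ih, eduTrie_descend_iff]
    constructor
    · rintro (⟨kw, hkw, hp⟩ | ⟨kw, hkw, hinf⟩)
      · exact ⟨kw, hkw, hp.isInfix⟩
      · exact ⟨kw, hkw, hinf.trans (List.suffix_cons c r).isInfix⟩
    · rintro ⟨kw, hkw, hinf⟩
      rcases List.infix_cons_iff.mp hinf with hpre | hinf'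
      · exact Or.inl ⟨kw, hkw, hpre⟩
      · exact Or.inr ⟨kw, hkw, hinf'⟩

-- The two per-qualification tests agree.
theorem test_eq (q : String) :
    eduKeywords.any (fun keyword => PySem.Str.isIn keyword (PySem.Str.lower q))
      = trieScan (PySem.Str.lower q).toList := by
  rw [Bool.eq_iff_iff, trieScan_iff]
  simp only [List.any_eq_true, PySem.Str.isIn_iff_infix]

-- A's foldl-append loop is a filter.
theorem foldA_eq (qs acc : List String) :
    qs.foldl
      (fun acc qual =>
        let qual_lower := PySem.Str.lower qual
        if eduKeywords.any (fun keyword => PySem.Str.isIn keyword qual_lower) then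
          acc ++ [qual]
        else acc)
      acc
    = acc ++ qs.filter (fun q => trieScan (PySem.Str.lower q).toList) := by
  induction qs generalizing acc with
  | nil => simp
  | cons q rest ih =>
    simp only [List.foldl_cons, List.filter_cons, ← test_eq q]
    cases h : eduKeywords.any (fun keyword => PySem.Str.isIn keyword (PySem.Str.lower q)) with
    | true =>
      simp only [if_true, ih, List.append_assoc, List.cons_append, List.nil_append]
    | false =>
      simp only [Bool.false_eq_true, if_false, ih]

-- ===== VERDICT (by name: the statement is the Claim_ definition above) =====
theorem extract_education_requirements_py_spec : Claim_equal_extract_education_requirements_py := by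
  intro qs _
  show extract_education_requirements_py qs = extract_education_requirements_py_alt qs
  unfold extract_education_requirements_py extract_education_requirements_py_alt
  simpa using foldA_eq qs []
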